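-- pv_equiv track=rewrite | github.com/parveenchahal/DSAlgo | stickers_to_spell_word.py | _get_remaining
-- ===== SOURCE A (Python) =====
-- def _get_remaining(curr, x):
--     count = [0] * 26
--     for c in curr:
--         i = ord(c) - ord('a')
--         count[i] += 1
--     for c in x:
--         i = ord(c) - ord('a')
--         if count[i] > 0:
--             count[i] -= 1
--     res = []
--     for i in range(26):
--         if count[i] > 0:
--             res.append(chr(ord('a') + i) * count[i])
--     return ''.join(res)
-- ===== SOURCE B (Python) =====
-- def _get_remaining(curr, x):
--     need = {}
--     for c in x:
--         need[c] = need.get(c, 0) + 1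
--     out = []
--     for c in sorted(curr):
--         if need.get(c, 0) > 0:
--             need[c] -= 1
--         else:
--             out.append(c)
--     return ''.join(out)
-- ===== Notes on version B (the rewrite author's own statement) =====
-- stated objective: idiomatic
-- what changed: Replaces the 26-slot count array with three index loops by one needed-count dict plus a single pass over sorted(curr) that skips each letter as long as it is still needed.
-- outside the precondition, e.g. on _get_remaining('`', ''): A returns 'z', B returns '`'; on _get_remaining('{', ''): A raises IndexError, B returns '{'
import Mathlib
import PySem

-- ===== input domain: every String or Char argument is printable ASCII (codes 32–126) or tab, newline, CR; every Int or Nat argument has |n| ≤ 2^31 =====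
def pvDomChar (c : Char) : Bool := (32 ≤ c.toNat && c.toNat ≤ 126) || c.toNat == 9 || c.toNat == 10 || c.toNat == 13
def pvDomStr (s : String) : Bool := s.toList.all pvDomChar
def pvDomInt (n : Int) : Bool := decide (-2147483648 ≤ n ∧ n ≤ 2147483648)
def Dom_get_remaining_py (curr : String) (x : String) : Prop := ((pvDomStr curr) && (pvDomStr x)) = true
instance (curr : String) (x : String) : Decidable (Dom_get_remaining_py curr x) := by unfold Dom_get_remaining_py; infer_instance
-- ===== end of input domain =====

-- B replaces A's 26-slot count array with its three index loops by a needed-count dict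
-- and one pass over sorted(curr) that skips each letter while it is still needed (objective: idiomatic).

-- ===== PORT A =====
-- literal transliteration of Source A; count[i] assignment/lookup is PySem.List.pySetD / pyGetD
-- (exact under Pre_, which keeps every index in range); ''.join of the pieces is the flatten
def get_remaining_py (curr : String) (x : String) : String :=
  let count : List Int := List.replicate 26 0
  let count := curr.toList.foldl
    (fun cnt c => PySem.List.pySetD cnt ((c.toNat : Int) - 97)
      (PySem.List.pyGetD cnt ((c.toNat : Int) - 97) 0 + 1)) count
  let count := x.toList.foldl
    (fun cnt c =>
      if PySem.List.pyGetD cnt ((c.toNat : Int) - 97) 0 > 0 then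
        PySem.List.pySetD cnt ((c.toNat : Int) - 97)
          (PySem.List.pyGetD cnt ((c.toNat : Int) - 97) 0 - 1)
      else cnt) count
  let res : List (List Char) := (List.range 26).foldl
    (fun res (i : Nat) =>
      if PySem.List.pyGetD count ((i : Nat) : Int) 0 > 0 then
        res ++ [List.replicate (PySem.List.pyGetD count ((i : Nat) : Int) 0).toNat (Char.ofNat (97 + i))]
      else res) []
  String.ofList res.flatten   -- ''.join(res)

-- ===== PORT B =====
-- literal transliteration of Source B
def get_remaining_py_alt (curr : String) (x : String) : String :=
  let need := x.toList.foldl (fun d c => d.insert c (d.getD c 0 + 1)) (PySem.Dict.empty : PySem.Dict Char Int)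
  let st := (PySem.List.sorted curr.toList (fun c => c) false).foldl
    (fun (p : PySem.Dict Char Int × List Char) c =>
      if p.1.getD c 0 > 0 then (p.1.insert c (p.1.getD c 0 - 1), p.2)
      else (p.1, p.2 ++ [c])) (need, [])
  String.ofList st.2   -- ''.join(out)

-- ===== PRECONDITION & SPEC =====
-- Pre_ keeps the function's natural domain: every character lowercase a-z. Outside it A either
-- raises IndexError (character codes < 71 or > 122) or, for codes 71-96, returns accidental
-- values produced by Python's negative-index wraparound (e.g. A('`','') = 'z' while B returns '`').
def Pre_get_remaining_py (curr : String) (x : String) : Prop :=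
  (curr.toList.all (fun c => 97 ≤ c.toNat && c.toNat ≤ 122)
    && x.toList.all (fun c => 97 ≤ c.toNat && c.toNat ≤ 122)) = true
instance (curr : String) (x : String) : Decidable (Pre_get_remaining_py curr x) := by
  unfold Pre_get_remaining_py; infer_instance

def pvWitness_get_remaining_py : String × String := ("abcab", "bcd")

def Spec_get_remaining_py (curr : String) (x : String) (out : String) : Prop := out = get_remaining_py_alt curr x
instance (curr : String) (x : String) (out : String) : Decidable (Spec_get_remaining_py curr x out) := by unfold Spec_get_remaining_py; infer_instance

-- ===== CLAIM (what is proved, stated in full; the proofs are below) =====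
def Claim_equal_get_remaining_py : Prop := ∀ (curr : String) (x : String), Dom_get_remaining_py curr x → Pre_get_remaining_py curr x → Spec_get_remaining_py curr x (get_remaining_py curr x)

-- ===== LEMMAS AND PROOFS =====

-- the i-th lowercase letter
def chL (i : Nat) : Char := Char.ofNat (97 + i)

-- what B's scan computes: drop, per letter c, the first d[c] occurrences
def dropNeed (d : PySem.Dict Char Int) : List Char → List Char
  | [] => []
  | c :: t => if d.getD c 0 > 0 then dropNeed (d.insert c (d.getD c 0 - 1)) t else c :: dropNeed d t

lemma chL_toNat {i : Nat} (h : i < 26) : (chL i).toNat = 97 + i := by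
  unfold chL Char.ofNat
  rw [dif_pos (by constructor <;> omega : Nat.isValidChar (97+i))]
  rfl

lemma char_eq_of_toNat {c d : Char} (h : c.toNat = d.toNat) : c = d := by
  apply Char.ext; exact UInt32.toNat_inj.mp h

lemma chL_of_lower {c : Char} (h1 : 97 ≤ c.toNat) (h2 : c.toNat ≤ 122) :
    chL (c.toNat - 97) = c := by
  apply char_eq_of_toNat
  rw [chL_toNat (by omega)]; omega

lemma getD_set (a : List Int) (k j : Nat) (hk : k < a.length) (v : Int) :
    (a.set k v).getD j 0 = if j = k then v else a.getD j 0 := by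
  rcases eq_or_ne j k with rfl | h
  · simp [List.getD_eq_getElem?_getD, hk]
  · simp [List.getD_eq_getElem?_getD, List.getElem?_set_ne (Ne.symm h), h]
lemma loopA1 (l : List Char) (hl : ∀ c ∈ l, 97 ≤ c.toNat ∧ c.toNat ≤ 122) :
    ∀ (a : List Int), a.length = 26 →
      (l.foldl (fun cnt c => PySem.List.pySetD cnt ((c.toNat : Int) - 97)
        (PySem.List.pyGetD cnt ((c.toNat : Int) - 97) 0 + 1)) a).length = 26 ∧
      ∀ j, j < 26 → (l.foldl (fun cnt c => PySem.List.pySetD cnt ((c.toNat : Int) - 97)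
        (PySem.List.pyGetD cnt ((c.toNat : Int) - 97) 0 + 1)) a).getD j 0
        = a.getD j 0 + l.count (chL j) := by
  induction l with
  | nil => intro a ha; simp [ha]
  | cons c t ih =>
    intro a ha
    obtain ⟨hc1, hc2⟩ := hl c (by simp)
    have hcast : ((c.toNat : Int) - 97) = ((c.toNat - 97 : Nat) : Int) := by omega
    have hklt : c.toNat - 97 < a.length := by omega
    have hstep : (PySem.List.pySetD a ((c.toNat : Int) - 97)
        (PySem.List.pyGetD a ((c.toNat : Int) - 97) 0 + 1))
        = a.set (c.toNat - 97) (a.getD (c.toNat - 97) 0 + 1) := by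
      rw [hcast]; simp [pysem]
    have hlen : (a.set (c.toNat - 97) (a.getD (c.toNat - 97) 0 + 1)).length = 26 := by
      simp [ha]
    obtain ⟨L, H⟩ := ih (fun d hd => hl d (by simp [hd])) _ hlen
    constructor
    · simpa [hstep] using L
    · intro j hj
      rw [List.foldl_cons, hstep, H j hj, getD_set _ _ _ hklt]
      rcases eq_or_ne j (c.toNat - 97) with rfl | hne
      · have : chL (c.toNat - 97) = c := chL_of_lower hc1 hc2
        simp [this, List.count_cons]; ring
      · have hch : chL j ≠ c := by
          intro h
          have h2 := chL_toNat hj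
          rw [h] at h2
          omega
        simp [hne, List.count_cons, Ne.symm hch]

lemma loopA2 (l : List Char) (hl : ∀ c ∈ l, 97 ≤ c.toNat ∧ c.toNat ≤ 122) :
    ∀ (a : List Int), a.length = 26 → (∀ j, j < 26 → 0 ≤ a.getD j 0) →
      (l.foldl (fun cnt c =>
        if PySem.List.pyGetD cnt ((c.toNat : Int) - 97) 0 > 0 then
          PySem.List.pySetD cnt ((c.toNat : Int) - 97)
            (PySem.List.pyGetD cnt ((c.toNat : Int) - 97) 0 - 1)
        else cnt) a).length = 26 ∧
      ∀ j, j < 26 → (l.foldl (fun cnt c =>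
        if PySem.List.pyGetD cnt ((c.toNat : Int) - 97) 0 > 0 then
          PySem.List.pySetD cnt ((c.toNat : Int) - 97)
            (PySem.List.pyGetD cnt ((c.toNat : Int) - 97) 0 - 1)
        else cnt) a).getD j 0 = max (a.getD j 0 - l.count (chL j)) 0 := by
  induction l with
  | nil =>
    intro a ha hnn
    rw [List.foldl_nil]
    refine ⟨ha, ?_⟩
    intro j hj
    have := hnn j hj
    rw [List.count_nil]
    omega
  | cons c t ih =>
    intro a ha hnn
    obtain ⟨hc1, hc2⟩ := hl c (by simp)
    have hcast : ((c.toNat : Int) - 97) = ((c.toNat - 97 : Nat) : Int) := by omega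
    have hklt : c.toNat - 97 < a.length := by omega
    have hget : PySem.List.pyGetD a ((c.toNat : Int) - 97) 0 = a.getD (c.toNat - 97) 0 := by
      rw [hcast]; simp [pysem]
    have hchc : chL (c.toNat - 97) = c := chL_of_lower hc1 hc2
    rw [List.foldl_cons]
    by_cases hpos : PySem.List.pyGetD a ((c.toNat : Int) - 97) 0 > 0
    · rw [hget] at hpos
      have hstep : (if PySem.List.pyGetD a ((c.toNat : Int) - 97) 0 > 0 then
          PySem.List.pySetD a ((c.toNat : Int) - 97)
            (PySem.List.pyGetD a ((c.toNat : Int) - 97) 0 - 1) else a)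
          = a.set (c.toNat - 97) (a.getD (c.toNat - 97) 0 - 1) := by
        rw [if_pos (by rw [hget]; exact hpos), hcast]; simp [pysem]
      rw [hstep]
      have hlen : (a.set (c.toNat - 97) (a.getD (c.toNat - 97) 0 - 1)).length = 26 := by simp [ha]
      have hnn' : ∀ j, j < 26 → 0 ≤ (a.set (c.toNat - 97) (a.getD (c.toNat - 97) 0 - 1)).getD j 0 := by
        intro j hj
        rw [getD_set _ _ _ hklt]
        rcases eq_or_ne j (c.toNat - 97) with rfl | hne
        · rw [if_pos rfl]; omega
        · rw [if_neg hne]; exact hnn j hj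
      obtain ⟨L, H⟩ := ih (fun d hd => hl d (by simp [hd])) _ hlen hnn'
      refine ⟨L, ?_⟩
      intro j hj
      rw [H j hj, getD_set _ _ _ hklt]
      rcases eq_or_ne j (c.toNat - 97) with rfl | hne
      · rw [if_pos rfl, hchc, List.count_cons_self]
        omega
      · have hch : chL j ≠ c := by
          intro h; have h2 := chL_toNat hj; rw [h] at h2; omega
        rw [if_neg hne, List.count_cons_of_ne (Ne.symm hch)]
    · rw [hget] at hpos
      have h0 : a.getD (c.toNat - 97) 0 = 0 := le_antisymm (not_lt.mp hpos) (hnn _ (by omega))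
      rw [if_neg (by rw [hget]; exact hpos)]
      obtain ⟨L, H⟩ := ih (fun d hd => hl d (by simp [hd])) a ha hnn
      refine ⟨L, ?_⟩
      intro j hj
      rw [H j hj]
      rcases eq_or_ne j (c.toNat - 97) with rfl | hne
      · rw [hchc, List.count_cons_self, h0]
        omega
      · have hch : chL j ≠ c := by
          intro h; have h2 := chL_toNat hj; rw [h] at h2; omega
        rw [List.count_cons_of_ne (Ne.symm hch)]

lemma loopB (l : List Char) : ∀ (d : PySem.Dict Char Int) (out : List Char),
    (l.foldl (fun (p : PySem.Dict Char Int × List Char) c =>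
      if p.1.getD c 0 > 0 then (p.1.insert c (p.1.getD c 0 - 1), p.2)
      else (p.1, p.2 ++ [c])) (d, out)).2 = out ++ dropNeed d l := by
  induction l with
  | nil => intro d out; simp [dropNeed]
  | cons c t ih =>
    intro d out
    rw [List.foldl_cons]
    by_cases h : d.getD c 0 > 0
    · rw [if_pos h]
      rw [ih]
      rw [dropNeed, if_pos h]
    · rw [if_neg h]
      rw [ih]
      rw [dropNeed, if_neg h]
      simp

lemma dropNeed_congr (l : List Char) : ∀ (d d' : PySem.Dict Char Int),
    (∀ c ∈ l, d.getD c 0 = d'.getD c 0) → dropNeed d l = dropNeed d' l := by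
  induction l with
  | nil => intro _ _ _; rfl
  | cons c t ih =>
    intro d d' h
    have hc := h c (by simp)
    rw [dropNeed, dropNeed, hc]
    by_cases hp : d'.getD c 0 > 0
    · rw [if_pos hp, if_pos hp]
      apply ih
      intro e he
      rw [PySem.Dict.getD_insert, PySem.Dict.getD_insert]
      split_ifs with h1
      · rfl
      · exact h e (by simp [he])
    · rw [if_neg hp, if_neg hp, ih d d' (fun e he => h e (by simp [he]))]

lemma dropNeed_replicate_append (c : Char) (n : Nat) :
    ∀ (m : Nat) (d : PySem.Dict Char Int), d.getD c 0 = (m : Int) → ∀ rest, c ∉ rest →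
      dropNeed d (List.replicate n c ++ rest)
        = List.replicate (n - m) c ++ dropNeed d rest := by
  induction n with
  | zero => intro m d hd rest hrest; simp
  | succ n ih =>
    intro m d hd rest hrest
    rw [List.replicate_succ, List.cons_append, dropNeed, hd]
    by_cases hm : (m : Int) > 0
    · rw [if_pos hm]
      have hd' : (d.insert c ((m:Int) - 1)).getD c 0 = ((m - 1 : Nat) : Int) := by
        rw [PySem.Dict.getD_insert, if_pos rfl]
        omega
      rw [ih (m-1) _ hd' rest hrest]
      have : n - (m - 1) = n + 1 - m := by omega
      rw [this]
      congr 1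
      apply dropNeed_congr
      intro e he
      rw [PySem.Dict.getD_insert, if_neg (by rintro rfl; exact hrest he)]
    · rw [if_neg hm]
      have hm0 : m = 0 := by omega
      subst hm0
      rw [ih 0 d hd rest hrest]
      simp [List.replicate_succ]

lemma chL_inj {i j : Nat} (hi : i < 26) (hj : j < 26) (h : chL i = chL j) : i = j := by
  have h1 := chL_toNat hi
  have h2 := chL_toNat hj
  rw [h, h2] at h1
  omega

lemma char_le_iff {c d : Char} : c ≤ d ↔ c.toNat ≤ d.toNat := by
  rw [Char.le_def, UInt32.le_iff_toNat_le]; rfl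

lemma count_flatMap (f : Nat → Nat) (c : Char) :
    ∀ is : List Nat,
      ((is.flatMap fun i => List.replicate (f i) (chL i)).count c)
        = ((is.filter (fun i => decide (chL i = c))).map f).sum := by
  intro is
  induction is with
  | nil => simp
  | cons i t ih =>
    rw [List.flatMap_cons, List.count_append, ih, List.filter_cons]
    by_cases h : chL i = c
    · simp [h]
    · simp [h, List.count_replicate, Ne.symm h]

lemma filter_range_eq {k : Nat} (hk : k < 26) (c : Char) (hc : ∀ i, i < 26 → (chL i = c ↔ i = k)) :
    ((List.range 26).filter (fun i => decide (chL i = c))) = [k] := by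
  have : ∀ i ∈ List.range 26, (decide (chL i = c)) = (decide (i = k)) := by
    intro i hi
    rw [List.mem_range] at hi
    simp [hc i hi]
  rw [List.filter_congr this]
  interval_cases k <;> decide

lemma blocks_perm (f : Nat → Nat) (cs : List Char)
    (hcs : ∀ c ∈ cs, 97 ≤ c.toNat ∧ c.toNat ≤ 122)
    (hf : ∀ i, i < 26 → f i = cs.count (chL i)) :
    ((List.range 26).flatMap fun i => List.replicate (f i) (chL i)).Perm cs := by
  rw [List.perm_iff_count]
  intro c
  rw [count_flatMap]
  by_cases hlo : 97 ≤ c.toNat ∧ c.toNat ≤ 122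
  · have hk : c.toNat - 97 < 26 := by omega
    rw [filter_range_eq hk c]
    · rw [List.map_singleton, List.sum_singleton, hf _ hk, chL_of_lower hlo.1 hlo.2]
    · intro i hi
      constructor
      · intro h
        have := chL_toNat hi
        rw [h] at this
        omega
      · rintro rfl
        exact chL_of_lower hlo.1 hlo.2
  · have h1 : ((List.range 26).filter (fun i => decide (chL i = c))) = [] := by
      apply List.filter_eq_nil_iff.mpr
      intro i hi
      rw [List.mem_range] at hi
      simp only [decide_eq_true_eq]
      intro h
      have := chL_toNat hi
      rw [h] at this
      omega
    have h2 : cs.count c = 0 := by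
      apply List.count_eq_zero.mpr
      intro hmem
      exact hlo (hcs c hmem)
    rw [h1, h2]
    rfl

lemma blocks_pairwise (f : Nat → Nat) :
    ∀ is : List Nat, is.Pairwise (· < ·) → (∀ i ∈ is, i < 26) →
      ((is.flatMap fun i => List.replicate (f i) (chL i)).Pairwise (· ≤ ·)) := by
  intro is
  induction is with
  | nil => intro _ _; simp
  | cons i t ih =>
    intro hp hb
    rw [List.flatMap_cons, List.pairwise_append]
    refine ⟨List.pairwise_replicate.mpr (Or.inr le_rfl), ih hp.of_cons (fun j hj => hb j (by simp [hj])), ?_⟩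
    intro a ha b hb'
    have ha' := List.eq_of_mem_replicate ha
    rw [List.mem_flatMap] at hb'
    obtain ⟨j, hj, hbj⟩ := hb'
    have hb'' := List.eq_of_mem_replicate hbj
    subst ha' hb''
    rw [char_le_iff, chL_toNat (hb i (by simp)), chL_toNat (hb j (by simp [hj]))]
    have : i < j := (List.pairwise_cons.mp hp).1 j hj
    omega

lemma flatten_filter_map (p : Nat → Prop) [DecidablePred p] (g : Nat → List Char)
    (is : List Nat) (h : ∀ i ∈ is, ¬ p i → g i = []) :
    ((is.filter fun i => decide (p i)).map g).flatten = (is.map g).flatten := by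
  induction is with
  | nil => rfl
  | cons i t ih =>
    rw [List.filter_cons]
    by_cases hp : p i
    · simp only [hp, decide_true, if_pos]
      rw [List.map_cons, List.map_cons, List.flatten_cons, List.flatten_cons,
        ih (fun j hj => h j (by simp [hj]))]
    · simp only [hp, decide_false, if_neg, Bool.false_eq_true, not_false_iff]
      rw [List.map_cons, List.flatten_cons, h i (by simp) hp,
        ih (fun j hj => h j (by simp [hj]))]
      rfl

lemma dropNeed_blocks (n m : Nat → Nat) :
    ∀ is : List Nat, is.Nodup → (∀ i ∈ is, i < 26) →
      ∀ d : PySem.Dict Char Int, (∀ i ∈ is, d.getD (chL i) 0 = (m i : Int)) →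
        dropNeed d (is.flatMap fun i => List.replicate (n i) (chL i))
          = is.flatMap (fun i => List.replicate (n i - m i) (chL i)) := by
  intro is
  induction is with
  | nil => intro _ _ d _; rfl
  | cons i t ih =>
    intro hnd hb d hd
    rw [List.flatMap_cons, List.flatMap_cons]
    have hnotin : chL i ∉ t.flatMap fun j => List.replicate (n j) (chL j) := by
      rw [List.mem_flatMap]
      rintro ⟨j, hj, hmem⟩
      have := List.eq_of_mem_replicate hmem
      have hij : i = j := chL_inj (hb i (by simp)) (hb j (by simp [hj])) this
      subst hij
      exact (List.nodup_cons.mp hnd).1 hj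
    rw [dropNeed_replicate_append (chL i) (n i) (m i) d (hd i (by simp)) _ hnotin,
      ih (List.nodup_cons.mp hnd).2 (fun j hj => hb j (by simp [hj])) d
        (fun j hj => hd j (by simp [hj]))]

lemma thirdLoop (c2 : List Int) (r : Nat → Nat) (hval : ∀ j, j < 26 → c2.getD j 0 = (r j : Int)) :
    ((List.range 26).foldl
      (fun res (i : Nat) =>
        if PySem.List.pyGetD c2 ((i : Nat) : Int) 0 > 0 then
          res ++ [List.replicate (PySem.List.pyGetD c2 ((i : Nat) : Int) 0).toNat (Char.ofNat (97 + i))]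
        else res) []).flatten
      = (List.range 26).flatMap (fun i => List.replicate (r i) (chL i)) := by
  rw [PySem.List.foldl_append_ite (p := fun i => PySem.List.pyGetD c2 ((i : Nat) : Int) 0 > 0)
    (f := fun i => List.replicate (PySem.List.pyGetD c2 ((i : Nat) : Int) 0).toNat (Char.ofNat (97 + i)))]
  rw [List.nil_append]
  rw [flatten_filter_map (fun i => PySem.List.pyGetD c2 ((i : Nat) : Int) 0 > 0) _ _ (by
    intro i hi hnp
    rw [List.mem_range] at hi
    have h : PySem.List.pyGetD c2 ((i : Nat) : Int) 0 = c2.getD i 0 := by simp [pysem]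
    have hnp' : ¬ PySem.List.pyGetD c2 ((i : Nat) : Int) 0 > 0 := hnp
    rw [h, hval i hi] at hnp'
    rw [h, hval i hi]
    simp only [List.replicate_eq_nil_iff]
    omega)]
  rw [← List.flatMap_def]
  apply List.flatMap_congr
  intro i hi
  rw [List.mem_range] at hi
  have h : PySem.List.pyGetD c2 ((i : Nat) : Int) 0 = c2.getD i 0 := by simp [pysem]
  rw [h, hval i hi, Int.toNat_natCast]
  rfl

lemma bScan (cs : List Char) (hcurr : ∀ c ∈ cs, 97 ≤ c.toNat ∧ c.toNat ≤ 122)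
    (d : PySem.Dict Char Int) (mm : Nat → Nat)
    (hd : ∀ i, i < 26 → d.getD (chL i) 0 = (mm i : Int)) :
    ((PySem.List.sorted cs (fun c => c) false).foldl
      (fun (p : PySem.Dict Char Int × List Char) c =>
        if p.1.getD c 0 > 0 then (p.1.insert c (p.1.getD c 0 - 1), p.2)
        else (p.1, p.2 ++ [c])) (d, [])).2
      = (List.range 26).flatMap (fun i => List.replicate (cs.count (chL i) - mm i) (chL i)) := by
  rw [loopB, List.nil_append]
  have hsorted : PySem.List.sorted cs (fun c => c) false
      = (List.range 26).flatMap (fun i => List.replicate (cs.count (chL i)) (chL i)) := by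
    apply PySem.List.sorted_id_eq_of_perm_of_pairwise
    · exact blocks_perm _ cs hcurr (fun i _ => rfl)
    · exact blocks_pairwise _ (List.range 26) List.pairwise_lt_range (by simp)
  rw [hsorted]
  exact dropNeed_blocks _ mm (List.range 26) List.nodup_range (by simp) d
    (fun i hi => hd i (by simpa using hi))


theorem main (curr x : String)
    (hcurr : ∀ c ∈ curr.toList, 97 ≤ c.toNat ∧ c.toNat ≤ 122)
    (hx : ∀ c ∈ x.toList, 97 ≤ c.toNat ∧ c.toNat ≤ 122) :
    get_remaining_py curr x = get_remaining_py_alt curr x := by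
  unfold get_remaining_py get_remaining_py_alt
  show String.ofList _ = String.ofList _
  have h0 : ∀ j, j < 26 → (List.replicate 26 (0:Int)).getD j 0 = 0 := by
    intro j hj
    rw [List.getD_eq_getElem?_getD, List.getElem?_replicate, if_pos hj]
    rfl
  obtain ⟨L1, H1⟩ := loopA1 curr.toList hcurr (List.replicate 26 0) (by simp)
  obtain ⟨L2, H2⟩ := loopA2 x.toList hx _ L1 (by
    intro j hj
    rw [H1 j hj, h0 j hj]
    positivity)
  rw [thirdLoop _ (fun i => curr.toList.count (chL i) - x.toList.count (chL i)) (by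
    intro j hj
    rw [H2 j hj, H1 j hj, h0 j hj]
    beta_reduce
    omega)]
  rw [bScan curr.toList hcurr _ (fun i => x.toList.count (chL i)) (by
    intro i hi
    rw [PySem.Dict.getD_foldl_insert_add_one]
    simp)]

-- ===== VERDICT (by name: the statement is the Claim_ definition above) =====
theorem get_remaining_py_spec : Claim_equal_get_remaining_py := by
  intro curr x _ hpre
  unfold Spec_get_remaining_py
  unfold Pre_get_remaining_py at hpre
  rw [Bool.and_eq_true] at hpre
  obtain ⟨h1, h2⟩ := hpre
  exact main curr x
    (fun c hc => by simpa using List.all_eq_true.mp h1 c hc)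
    (fun c hc => by simpa using List.all_eq_true.mp h2 c hc)
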